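-- pv_equiv track=rewrite | github.com/junos-ai-org/MMTU | projects/tabular-llms-research/table_permuter.py | convert_table_to_natural_language
-- ===== SOURCE A (Python) =====
-- def convert_table_to_natural_language(
--     header_cells: list[str],
--     data_rows: list[list[str]],
--     table_name: str | None = None,
-- ) -> str:
--     """Convert parsed table components into a natural language description.
--
--     Format:
--         You're presented with a table: `table name`
--         It has X columns and N rows.
--         Here are the serialized columns, one per line:
--         `col1`: val1, val2, val3 ...
--         `col2`: ...
--
--         Here are the serialized rows, one per line:
--         row1: `col1`: val1, `col2`: val2, ...
--         row2: ...
--     """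
--     n_cols = len(header_cells)
--     n_rows = len(data_rows)
--
--     lines: list[str] = []
--
--     # Header
--     label = f"`{table_name}`" if table_name else "the following data"
--     lines.append(f"You're presented with a table: {label}")
--     lines.append(f"It has {n_cols} columns and {n_rows} rows.")
--
--     # Column-oriented view
--     lines.append("Here are the serialized columns, one per line:")
--     for col_idx, col_name in enumerate(header_cells):
--         values = [
--             row[col_idx] if col_idx < len(row) else ""
--             for row in data_rows
--         ]
--         lines.append(f"`{col_name}`: {', '.join(values)}")
--
--     # Row-oriented view
--     lines.append("")
--     lines.append("Here are the serialized rows, one per line:")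
--     for row_idx, row in enumerate(data_rows, start=1):
--         pairs = []
--         for col_idx, col_name in enumerate(header_cells):
--             val = row[col_idx] if col_idx < len(row) else ""
--             pairs.append(f"`{col_name}`: {val}")
--         lines.append(f"row{row_idx}: {', '.join(pairs)}")
--
--     return "\n".join(lines)
-- ===== SOURCE B (Python) =====
-- def convert_table_to_natural_language(
--     header_cells,
--     data_rows,
--     table_name=None,
-- ):
--     """Single-pass rewrite: ONE scan over the data rows simultaneously builds
--     the per-column value accumulators and the serialized row lines; the column
--     view is then emitted from the accumulators, so no per-column scan over the
--     rows remains."""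
--     n_cols = len(header_cells)
--     col_acc = [[] for _ in header_cells]
--     row_lines = []
--     for k, row in enumerate(data_rows, start=1):
--         vals = [row[i] if i < len(row) else "" for i in range(n_cols)]
--         for acc, v in zip(col_acc, vals):
--             acc.append(v)
--         row_lines.append(
--             f"row{k}: " + ", ".join(f"`{n}`: {v}" for n, v in zip(header_cells, vals))
--         )
--     label = f"`{table_name}`" if table_name else "the following data"
--     out = [
--         f"You're presented with a table: {label}",
--         f"It has {n_cols} columns and {len(data_rows)} rows.",
--         "Here are the serialized columns, one per line:",
--         *(f"`{n}`: " + ", ".join(vs) for n, vs in zip(header_cells, col_acc)),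
--         "",
--         "Here are the serialized rows, one per line:",
--         *row_lines,
--     ]
--     return "\n".join(out)
-- ===== Notes on version B (the rewrite author's own statement) =====
-- stated objective: alternative
-- what changed: B makes a single pass over the data rows, simultaneously appending each padded value to a per-column accumulator and emitting the row line, then prints the column view from the accumulators; A's separate per-column pass over all rows disappears.
import Mathlib
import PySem

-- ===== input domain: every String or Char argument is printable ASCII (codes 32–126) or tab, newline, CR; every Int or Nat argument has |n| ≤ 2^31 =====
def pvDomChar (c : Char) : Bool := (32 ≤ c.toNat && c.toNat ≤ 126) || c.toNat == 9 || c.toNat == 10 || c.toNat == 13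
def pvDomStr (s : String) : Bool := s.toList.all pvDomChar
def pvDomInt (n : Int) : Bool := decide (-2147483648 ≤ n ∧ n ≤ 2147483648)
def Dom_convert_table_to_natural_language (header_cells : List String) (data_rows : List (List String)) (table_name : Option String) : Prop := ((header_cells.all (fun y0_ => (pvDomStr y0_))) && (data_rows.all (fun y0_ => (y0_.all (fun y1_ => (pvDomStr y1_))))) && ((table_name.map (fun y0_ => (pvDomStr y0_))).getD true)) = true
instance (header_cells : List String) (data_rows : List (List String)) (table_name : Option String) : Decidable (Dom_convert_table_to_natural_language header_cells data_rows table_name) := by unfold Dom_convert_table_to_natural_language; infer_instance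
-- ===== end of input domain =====

-- B scans the data rows ONCE, simultaneously filling per-column accumulators and the row
-- lines, then emits the column view from the accumulators; A instead makes a separate
-- pass over all rows for every column. Objective: alternative decomposition (same cost).

-- ===== PORT A =====
def convert_table_to_natural_language (header_cells : List String) (data_rows : List (List String)) (table_name : Option String) : String :=
  let n_cols : Nat := header_cells.length
  let n_rows : Nat := data_rows.length
  let label : String :=
    match table_name with
    | some s => if s.toList ≠ [] then "`" ++ s ++ "`" else "the following data"
    | none => "the following data"
  let lines : List String := []
  let lines := lines ++ ["You're presented with a table: " ++ label]
  let lines := lines ++ ["It has " ++ PySem.Int.toStr (n_cols : Int) ++ " columns and " ++ PySem.Int.toStr (n_rows : Int) ++ " rows."]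
  let lines := lines ++ ["Here are the serialized columns, one per line:"]
  let lines := (PySem.List.enumerate header_cells 0).foldl (fun acc p =>
    let values := data_rows.map (fun row =>
      if p.1 < (row.length : Int) then PySem.List.pyGetD row p.1 "" else "")
    acc ++ ["`" ++ p.2 ++ "`: " ++ PySem.Str.join ", " values]) lines
  let lines := lines ++ [""]
  let lines := lines ++ ["Here are the serialized rows, one per line:"]
  let lines := (PySem.List.enumerate data_rows 1).foldl (fun acc p =>
    let pairs := (PySem.List.enumerate header_cells 0).foldl (fun ps q =>
      ps ++ ["`" ++ q.2 ++ "`: " ++ (if q.1 < (p.2.length : Int) then PySem.List.pyGetD p.2 q.1 "" else "")]) ([] : List String)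
    acc ++ ["row" ++ PySem.Int.toStr p.1 ++ ": " ++ PySem.Str.join ", " pairs]) lines
  PySem.Str.join "\n" lines

-- ===== PORT B =====
def convert_table_to_natural_language_alt (header_cells : List String) (data_rows : List (List String)) (table_name : Option String) : String :=
  let n_cols : Nat := header_cells.length
  -- single pass: state = (per-column accumulators, row lines built so far)
  let st : List (List String) × List String :=
    (PySem.List.enumerate data_rows 1).foldl (fun st p =>
      let vals := (List.range n_cols).map (fun i => if i < p.2.length then p.2.getD i "" else "")
      ((st.1.zip vals).map (fun q => q.1 ++ [q.2]),
       st.2 ++ ["row" ++ PySem.Int.toStr p.1 ++ ": " ++ PySem.Str.join ", "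
         ((header_cells.zip vals).map (fun q => "`" ++ q.1 ++ "`: " ++ q.2))]))
      (header_cells.map (fun _ => ([] : List String)), ([] : List String))
  let label : String :=
    match table_name with
    | some s => if s.toList ≠ [] then "`" ++ s ++ "`" else "the following data"
    | none => "the following data"
  PySem.Str.join "\n"
    (["You're presented with a table: " ++ label,
      "It has " ++ PySem.Int.toStr (n_cols : Int) ++ " columns and " ++ PySem.Int.toStr (data_rows.length : Int) ++ " rows.",
      "Here are the serialized columns, one per line:"]
     ++ (header_cells.zip st.1).map (fun q => "`" ++ q.1 ++ "`: " ++ PySem.Str.join ", " q.2)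
     ++ ["", "Here are the serialized rows, one per line:"]
     ++ st.2)

-- ===== PRECONDITION & SPEC =====
def Spec_convert_table_to_natural_language (header_cells : List String) (data_rows : List (List String)) (table_name : Option String) (out : String) : Prop := out = convert_table_to_natural_language_alt header_cells data_rows table_name
instance (header_cells : List String) (data_rows : List (List String)) (table_name : Option String) (out : String) : Decidable (Spec_convert_table_to_natural_language header_cells data_rows table_name out) := by unfold Spec_convert_table_to_natural_language; infer_instance

-- ===== CLAIM (what is proved, stated in full; the proofs are below) =====
def Claim_equal_convert_table_to_natural_language : Prop := ∀ (header_cells : List String) (data_rows : List (List String)) (table_name : Option String), Dom_convert_table_to_natural_language header_cells data_rows table_name → Spec_convert_table_to_natural_language header_cells data_rows table_name (convert_table_to_natural_language header_cells data_rows table_name)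

-- ===== LEMMAS AND PROOFS =====

-- The padded values of one row, as B computes them.
def padVals (n : Nat) (row : List String) : List String :=
  (List.range n).map (fun i => if i < row.length then row.getD i "" else "")

-- Zipping the headers with the padded values of a row is A's enumerate-and-pad loop, as a map.
lemma zip_padVals_eq_enumerate_map (hs : List String) (row : List String) :
    (hs.zip (padVals hs.length row)).map (fun q => "`" ++ q.1 ++ "`: " ++ q.2)
      = (PySem.List.enumerate hs 0).map (fun q =>
        "`" ++ q.2 ++ "`: " ++ (if q.1 < (row.length : Int) then PySem.List.pyGetD row q.1 "" else "")) := by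
  apply List.ext_getElem
  · simp [padVals, PySem.List.length_enumerate]
  · intro k h1 h2
    simp only [padVals, List.getElem_map, List.getElem_zip, List.getElem_range,
      PySem.List.getElem_enumerate, Int.zero_add, PySem.List.pyGetD_natCast]
    by_cases h : k < row.length
    · simp [h, show ((k:Int) < (row.length:Int)) from by exact_mod_cast h]
    · simp [h, show ¬((k:Int) < (row.length:Int)) from by exact_mod_cast h]

-- Closed form of B's single-pass fold: the accumulators hold each column of the
-- processed rows, and the second component holds the row lines.
lemma fold_closed_form (hs : List String) (rows : List (List String))
    (s : Int) (accs : List (List String)) (lines : List String)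
    (h : accs.length = hs.length) :
    (PySem.List.enumerate rows s).foldl (fun st p =>
      let vals := (List.range hs.length).map (fun i => if i < p.2.length then p.2.getD i "" else "")
      ((st.1.zip vals).map (fun q => q.1 ++ [q.2]),
       st.2 ++ ["row" ++ PySem.Int.toStr p.1 ++ ": " ++ PySem.Str.join ", "
         ((hs.zip vals).map (fun q => "`" ++ q.1 ++ "`: " ++ q.2))])) (accs, lines)
    = ((List.range hs.length).map (fun i =>
          accs.getD i [] ++ rows.map (fun row => if i < row.length then row.getD i "" else "")),
       lines ++ (PySem.List.enumerate rows s).map (fun p =>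
         "row" ++ PySem.Int.toStr p.1 ++ ": " ++ PySem.Str.join ", "
           ((hs.zip (padVals hs.length p.2)).map (fun q => "`" ++ q.1 ++ "`: " ++ q.2)))) := by
  induction rows generalizing s accs lines with
  | nil =>
    simp only [PySem.List.enumerate_nil, List.foldl_nil, List.map_nil, List.append_nil]
    refine Prod.ext ?_ rfl
    apply List.ext_getElem
    · simp [h]
    · intro k h1 h2
      simp only [List.getElem_map, List.getElem_range]
      rw [List.getD_eq_getElem?_getD, List.getElem?_eq_getElem (by simp_all), Option.getD_some]
  | cons row rows ih =>
    rw [PySem.List.enumerate_cons, List.foldl_cons]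
    dsimp only
    rw [ih (s + 1) _ _ (by simp [h])]
    refine Prod.ext ?_ (by simp [padVals, List.getD_eq_getElem?_getD])
    apply List.map_congr_left
    intro i hi
    rw [List.mem_range] at hi
    simp only [List.map_cons]
    rw [List.getD_eq_getElem?_getD, List.getElem?_eq_getElem (by simp [padVals, h]; omega),
      Option.getD_some, List.getElem_map, List.getElem_zip]
    simp only [List.getElem_map, List.getElem_range]
    rw [List.getD_eq_getElem?_getD (l := accs), List.getElem?_eq_getElem (by omega), Option.getD_some]
    simp [List.append_assoc]

-- ===== VERDICT (by name: the statement is the Claim_ definition above) =====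
theorem convert_table_to_natural_language_spec : Claim_equal_convert_table_to_natural_language := by
  intro hs d t _
  unfold Spec_convert_table_to_natural_language convert_table_to_natural_language convert_table_to_natural_language_alt
  simp only [PySem.List.foldl_append_singleton_eq_map, List.nil_append, List.append_assoc,
    List.cons_append]
  rw [fold_closed_form hs d 1 _ _ (by simp)]
  apply congrArg
  apply congrArg
  apply congrArg
  apply congrArg
  congr 1
  · -- column lines: A's per-column scans = B's accumulators
    apply List.ext_getElem
    · simp [PySem.List.length_enumerate]
    · intro k h1 h2
      simp only [List.getElem_map, List.getElem_zip, List.getElem_range,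
        PySem.List.getElem_enumerate, Int.zero_add]
      rw [List.getD_eq_getElem?_getD, List.getElem?_eq_getElem (by simpa using (by simpa [PySem.List.length_enumerate] using h1)), Option.getD_some]
      simp only [List.getElem_map, List.nil_append]
      apply congrArg
      apply congrArg
      apply List.map_congr_left
      intro row _
      by_cases h : k < row.length
      · simp [h, show ((k:Int) < (row.length:Int)) from by exact_mod_cast h, PySem.List.pyGetD_natCast]
      · simp [h, show ¬((k:Int) < (row.length:Int)) from by exact_mod_cast h]
  · -- row lines
    apply congrArg
    apply congrArg
    apply List.map_congr_left
    intro p _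
    apply congrArg
    apply congrArg
    exact (zip_padVals_eq_enumerate_map hs p.2).symm
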